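-- pv_equiv track=rewrite | github.com/alexitosrv/at | exe/D____.py | answer
-- ===== SOURCE A (Python) =====
-- def find_candidates(s, t, m):
-- 	k = 0
-- 	still_looking = True
-- 	while still_looking:
-- 		k = s.find(t, k)
-- 		if k > -1:
-- 			yield s[:k]+s[k+m:]
-- 			k = k+1
-- 		else:
-- 			still_looking = False
--
-- def answer(chunk, word):
-- 	r = chunk
-- 	m = len(word)
-- 	candidates = list()
-- 	candidates.append(chunk)
-- 	passed_over = set()
--
-- 	while len(candidates):
-- 		v = candidates.pop()
-- 		for c in find_candidates(v, word, m):
-- 			if c not in passed_over: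
-- 				if len(c) == len(r):
-- 					r = min(c, r)
-- 				elif len(c) < len(r):
-- 					r = c
-- 				passed_over.add(c)
-- 				candidates.append(c)
-- 	return r
-- ===== SOURCE B (Python) =====
-- # B: breadth-first closure of the deletion DAG by levels, children enumerated by a
-- # slice-comparison comprehension, single min with a (length, lexicographic) key at the end.
-- def answer(chunk, word):
--     m = len(word)
--     seen = {chunk}
--     frontier = [chunk]
--     while frontier:
--         nxt = []
--         for v in frontier:
--             for c in (v[:i] + v[i + m:] for i in range(len(v) - m + 1) if v[i:i + m] == word):
--                 if c not in seen:
--                     seen.add(c)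
--                     nxt.append(c)
--         frontier = nxt
--     return min(seen, key=lambda s: (len(s), s))
-- ===== Notes on version B (the rewrite author's own statement) =====
-- stated objective: alternative
-- what changed: A threads one global running minimum through a depth-first explicit-stack search with a generator for occurrences; B computes the reachable set by breadth-first levels with a slice-comparison comprehension for occurrences and takes a single min with a (length, lexicographic) key at the end.
import Mathlib
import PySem

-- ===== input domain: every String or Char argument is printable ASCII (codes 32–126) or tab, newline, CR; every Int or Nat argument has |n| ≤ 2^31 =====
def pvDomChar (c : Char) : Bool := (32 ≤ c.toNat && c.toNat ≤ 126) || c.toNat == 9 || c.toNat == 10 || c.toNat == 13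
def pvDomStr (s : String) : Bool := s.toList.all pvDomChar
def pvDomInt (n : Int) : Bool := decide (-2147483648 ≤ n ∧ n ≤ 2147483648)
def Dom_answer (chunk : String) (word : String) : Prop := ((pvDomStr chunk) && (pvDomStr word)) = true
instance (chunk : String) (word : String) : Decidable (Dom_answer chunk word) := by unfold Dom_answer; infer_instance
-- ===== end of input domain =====

-- B replaces A's depth-first stack with a threaded running minimum by a breadth-first closure
-- by levels followed by a single min with a (length, lexicographic) key: same return value,
-- a different decomposition (objective: alternative).

-- ===== PORT A =====
-- find_candidates(s, t, m): the generator, materialised as the list of its yields.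
-- The while loop is run on a fuel counter; fuel s.length+1 bounds its iterations
-- (each iteration moves the search start strictly forward), so the port is exact.
def findCandidatesA (s t : List Char) (m : Int) : Nat → Int → List (List Char)
  | 0, _ => []
  | fuel + 1, k =>
    let j := PySem.Chars.findFrom s t k none          -- k = s.find(t, k)
    if j > -1 then
      (PySem.List.slice s none (some j) ++ PySem.List.slice s (some (j + m)) none)
        :: findCandidatesA s t m fuel (j + 1)         -- yield s[:k]+s[k+m:]; k = k+1
    else []

-- body of A's inner 'for c in find_candidates(v, word, m)' loop; state (candidates, passed_over, r).
def visitA (st : List (List Char) × PySem.Set (List Char) × List Char) (c : List Char) :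
    List (List Char) × PySem.Set (List Char) × List Char :=
  if c ∈ st.2.1 then st
  else
    let r := st.2.2
    let r' := if c.length = r.length then min c r
              else if c.length < r.length then c else r
    (c :: st.1, st.2.1.add c, r')

-- A's 'while len(candidates)' loop. Python appends to and pops from the RIGHT end of the
-- list; the stack is kept head-first here, so append = cons and pop = head — the same LIFO
-- order. Fuel 2^|chunk|+2 is an upper bound on the number of iterations (proved below it is
-- never exhausted); it is only a totality guard.
def loopA (t : List Char) (m : Int) :
    Nat → List (List Char) → PySem.Set (List Char) → List Char → List Char
  | 0, _, _, r => r
  | fuel + 1, cands, po, r =>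
    match cands with
    | [] => r
    | v :: rest =>
      let st := (findCandidatesA v t m (v.length + 1) 0).foldl visitA (rest, po, r)
      loopA t m fuel st.1 st.2.1 st.2.2

def answer (chunk : String) (word : String) : String :=
  let c := chunk.toList
  let w := word.toList
  String.ofList (loopA w (w.length : Int) (2 ^ c.length + 2) [c] PySem.Set.empty c)

-- ===== PORT B =====
-- the comprehension (v[:i] + v[i+m:] for i in range(len(v)-m+1) if v[i:i+m] == word)
def childrenB (v w : List Char) (m : Int) : List (List Char) :=
  ((PySem.List.pyRange 0 ((v.length : Int) - m + 1)).filter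
      (fun i => PySem.List.slice v (some i) (some (i + m)) == w)).map
    (fun i => PySem.List.slice v none (some i) ++ PySem.List.slice v (some (i + m)) none)

-- body of B's 'if c not in seen' block; state (nxt, seen).
def addB (st : List (List Char) × PySem.Set (List Char)) (c : List Char) :
    List (List Char) × PySem.Set (List Char) :=
  if c ∈ st.2 then st else (st.1 ++ [c], st.2.add c)

-- B's 'while frontier' loop, one breadth-first level per iteration. Fuel 2^|chunk|+2
-- bounds the number of levels (proved below it is never exhausted); only a totality guard.
def loopB (w : List Char) (m : Int) :
    Nat → List (List Char) → PySem.Set (List Char) → PySem.Set (List Char)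
  | 0, _, seen => seen
  | fuel + 1, frontier, seen =>
    match frontier with
    | [] => seen
    | _ :: _ =>
      let st := frontier.foldl (fun st v => (childrenB v w m).foldl addB st) ([], seen)
      loopB w m fuel st.1 st.2

-- min(seen, key=lambda s: (len(s), s)); seen always contains chunk, so Python's min never
-- raises and the .getD default is never used.
def answer_alt (chunk : String) (word : String) : String :=
  let c := chunk.toList
  let w := word.toList
  let seen := loopB w (w.length : Int) (2 ^ c.length + 2) [c] (PySem.Set.ofList [c])
  String.ofList ((PySem.List.min2? seen (fun s => s.length) (fun s => s)).getD c)

-- ===== PRECONDITION & SPEC =====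
def Spec_answer (chunk : String) (word : String) (out : String) : Prop := out = answer_alt chunk word
instance (chunk : String) (word : String) (out : String) : Decidable (Spec_answer chunk word out) := by unfold Spec_answer; infer_instance

-- ===== CLAIM (what is proved, stated in full; the proofs are below) =====
def Claim_equal_answer : Prop := ∀ (chunk : String) (word : String), Dom_answer chunk word → Spec_answer chunk word (answer chunk word)

-- ===== LEMMAS AND PROOFS =====

def keyLe (x y : List Char) : Prop :=
  x.length < y.length ∨ (x.length = y.length ∧ x ≤ y)
def StepDel (w v c : List Char) : Prop :=
  ∃ i : Nat, i + w.length ≤ v.length ∧ w <+: v.drop i ∧ c = v.take i ++ v.drop (i + w.length)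
def ReachDel (w c0 x : List Char) : Prop := Relation.ReflTransGen (StepDel w) c0 x

lemma keyLe_refl (x : List Char) : keyLe x x := Or.inr ⟨rfl, le_refl x⟩

lemma keyLe_trans {x y z : List Char} (h1 : keyLe x y) (h2 : keyLe y z) : keyLe x z := by
  rcases h1 with h1 | ⟨e1, l1⟩ <;> rcases h2 with h2 | ⟨e2, l2⟩
  · exact Or.inl (h1.trans h2)
  · exact Or.inl (e2 ▸ h1)
  · exact Or.inl (e1 ▸ h2)
  · exact Or.inr ⟨e1.trans e2, l1.trans l2⟩

lemma keyLe_antisymm {x y : List Char} (h1 : keyLe x y) (h2 : keyLe y x) : x = y := by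
  rcases h1 with h1 | ⟨e1, l1⟩ <;> rcases h2 with h2 | ⟨e2, l2⟩ <;> try omega
  exact le_antisymm l1 l2

lemma keyLe_iff_not {x y : List Char} :
    keyLe x y ↔ ¬ (y.length < x.length ∨ (¬ x.length < y.length ∧ y < x)) := by
  unfold keyLe
  push Not
  constructor
  · rintro (h | ⟨e, l⟩)
    · exact ⟨by omega, fun hle => absurd hle (by omega)⟩
    · exact ⟨by omega, fun _ => l⟩
  · rintro ⟨h1, h2⟩
    rcases Nat.lt_or_ge x.length y.length with h | h
    · exact Or.inl h
    · exact Or.inr ⟨by omega, h2 (by omega)⟩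

lemma rel_sublist {w v c : List Char} (h : StepDel w v c) : c.Sublist v := by
  obtain ⟨i, _, _, hc⟩ := h
  subst hc
  have hs : (v.drop (i + w.length)).Sublist (v.drop i) := by
    have : v.drop (i + w.length) = (v.drop i).drop w.length := by
      rw [List.drop_drop, Nat.add_comm]
    rw [this]; exact List.drop_sublist _ _
  have h2 := List.Sublist.append (List.Sublist.refl (v.take i)) hs
  rwa [List.take_append_drop] at h2

lemma reach_sublist {w c0 x : List Char} (h : ReachDel w c0 x) : x.Sublist c0 := by
  induction h with
  | refl => exact List.Sublist.refl _
  | tail _ hstep ih => exact (rel_sublist hstep).trans ih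

lemma length_le_cap (c0 : List Char) (l : List (List Char)) (h1 : l.Nodup)
    (h2 : ∀ x ∈ l, x.Sublist c0) : l.length ≤ 2 ^ c0.length := by
  have := (h1.subperm (l₂ := c0.sublists) (fun x hx => List.mem_sublists.mpr (h2 x hx))).length_le
  simpa [List.length_sublists] using this

lemma findFrom_past (v w : List Char) :
    PySem.Chars.findFrom v w ((v.length : Int) + 1) none = -1 := by
  simp only [PySem.Chars.findFrom]
  have h : ¬ ((v.length : Int) + 1 < 0) := by omega
  simp [h]

lemma natcast_add_len (n m : Nat) : ((n : Int) + (m : Int)) = (((n + m : Nat)) : Int) := by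
  push_cast; ring

lemma findA_mem (v w : List Char) :
    ∀ (fuel k : Nat), k ≤ v.length + 1 → v.length + 1 ≤ fuel + k →
    ∀ x, x ∈ findCandidatesA v w (w.length : Int) fuel (k : Int) ↔
      ∃ i : Nat, k ≤ i ∧ i + w.length ≤ v.length ∧ w <+: v.drop i ∧
        x = v.take i ++ v.drop (i + w.length) := by
  intro fuel
  induction fuel with
  | zero =>
    intro k hk hfuel x
    simp only [findCandidatesA, List.not_mem_nil, false_iff]
    rintro ⟨i, hki, hiw, -, -⟩
    omega
  | succ fuel ih =>
    intro k hk hfuel x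
    by_cases hklen : k ≤ v.length
    · rcases Classical.em (PySem.Chars.findFrom v w (k : Int) none = -1) with hfound | hfound
      · have hno : ¬ w <:+: v.drop k :=
          (PySem.Chars.findFrom_natCast_eq_neg_one_iff v w k hklen).mp hfound
        simp only [findCandidatesA, hfound]
        norm_num
        intro i hki hiw hpre hxx
        apply hno
        have hdd : v.drop i = (v.drop k).drop (i - k) := by
          rw [List.drop_drop]; congr 1; omega
        exact (hpre.isInfix).trans (hdd ▸ (List.drop_suffix (i - k) (v.drop k)).isInfix)
      · obtain ⟨hkj, hprej, hmin⟩ :=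
          PySem.Chars.findFrom_natCast_spec v w k hklen hfound
        have hj0 : (0 : Int) ≤ PySem.Chars.findFrom v w (k : Int) none :=
          le_trans (by exact_mod_cast Nat.zero_le k) hkj
        have hjlen : PySem.Chars.findFrom v w (k : Int) none ≤ (v.length : Int) := by
          rw [PySem.Chars.findFrom_natCast v w k hklen]
          have hfl := PySem.Chars.find_le_length (v.drop k) w
          simp only [List.length_drop] at hfl
          split
          · omega
          · push_cast at hfl ⊢; omega
        simp only [findCandidatesA]
        set j := PySem.Chars.findFrom v w (k : Int) none with hjdef
        set n := j.toNat with hndef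
        have hjn : j = (n : Int) := by omega
        have hkn : k ≤ n := by omega
        have hnlen : n ≤ v.length := by omega
        have hnw : n + w.length ≤ v.length := by
          have hpl := hprej.length_le
          simp only [List.length_drop] at hpl
          omega
        rw [if_pos (by omega : j > -1)]
        rw [hjn, PySem.List.slice_to_natCast, natcast_add_len, PySem.List.slice_from_natCast]
        rw [show ((n : Int) + 1) = ((n + 1 : Nat) : Int) by push_cast; ring]
        rw [List.mem_cons, ih (n + 1) (by omega) (by omega) x]
        constructor
        · rintro (rfl | ⟨i, hi1, hi2, hi3, hi4⟩)
          · exact ⟨n, hkn, hnw, hprej, rfl⟩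
          · exact ⟨i, by omega, hi2, hi3, hi4⟩
        · rintro ⟨i, hi1, hi2, hi3, hi4⟩
          rcases Nat.lt_or_ge i (n + 1) with hlt | hge
          · have hin : i = n := by
              rcases Nat.lt_or_ge i n with h' | h'
              · exact absurd hi3 (hmin i hi1 h')
              · omega
            subst hin
            left
            rw [hi4]
          · right; exact ⟨i, hge, hi2, hi3, hi4⟩
    · have hk1 : k = v.length + 1 := by omega
      subst hk1
      simp only [findCandidatesA]
      rw [show (((v.length + 1 : Nat)) : Int) = (v.length : Int) + 1 by push_cast; ring,
        findFrom_past]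
      norm_num
      intro i hki hiw hpre hxx
      omega

lemma childA_mem (v w x : List Char) :
    x ∈ findCandidatesA v w (w.length : Int) (v.length + 1) 0 ↔ StepDel w v x := by
  have h := findA_mem v w (v.length + 1) 0 (by omega) (by omega) x
  rw [show ((0 : Nat) : Int) = 0 by norm_num] at h
  rw [h]
  unfold StepDel
  constructor
  · rintro ⟨i, -, h2, h3, h4⟩; exact ⟨i, h2, h3, h4⟩
  · rintro ⟨i, h2, h3, h4⟩; exact ⟨i, Nat.zero_le i, h2, h3, h4⟩

lemma childB_mem (v w x : List Char) :
    x ∈ childrenB v w (w.length : Int) ↔ StepDel w v x := by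
  unfold childrenB StepDel
  rw [List.mem_map]
  constructor
  · rintro ⟨i, hi, hx⟩
    rw [List.mem_filter, PySem.List.mem_pyRange_one] at hi
    obtain ⟨⟨h0, hlt⟩, hsl⟩ := hi
    obtain ⟨n, rfl⟩ := Int.eq_ofNat_of_zero_le h0
    have hn : n + w.length ≤ v.length := by omega
    refine ⟨n, hn, ?_, ?_⟩
    · have heq : PySem.List.slice v (some (n : Int)) (some ((n : Int) + (w.length : Int))) = w :=
        beq_iff_eq.mp hsl
      rw [natcast_add_len, PySem.List.slice_natCast] at heq
      have ht : (v.drop n).take w.length = w := by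
        rw [show n + w.length - n = w.length by omega] at heq
        exact heq
      rw [List.prefix_iff_eq_take]
      exact ht.symm
    · rw [← hx, PySem.List.slice_to_natCast, natcast_add_len, PySem.List.slice_from_natCast]
  · rintro ⟨n, hn, hpre, rfl⟩
    refine ⟨(n : Int), ?_, ?_⟩
    · rw [List.mem_filter, PySem.List.mem_pyRange_one]
      refine ⟨⟨by omega, by omega⟩, ?_⟩
      rw [beq_iff_eq, natcast_add_len, PySem.List.slice_natCast,
        show n + w.length - n = w.length by omega]
      exact (List.prefix_iff_eq_take.mp hpre).symm
    · rw [PySem.List.slice_to_natCast, natcast_add_len, PySem.List.slice_from_natCast]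

lemma keyLe_update (c r : List Char) :
    ((if c.length = r.length then min c r
      else if c.length < r.length then c else r) = c ∨
     (if c.length = r.length then min c r
      else if c.length < r.length then c else r) = r) ∧
    keyLe (if c.length = r.length then min c r
      else if c.length < r.length then c else r) r ∧
    keyLe (if c.length = r.length then min c r
      else if c.length < r.length then c else r) c := by
  by_cases h1 : c.length = r.length
  · rw [if_pos h1]
    refine ⟨min_choice c r, ?_, ?_⟩
    · have hl : (min c r).length = r.length := by
        rcases min_choice c r with h | h
        · rw [h]; exact h1
        · rw [h]
      exact Or.inr ⟨hl, min_le_right c r⟩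
    · have hl : (min c r).length = c.length := by
        rcases min_choice c r with h | h
        · rw [h]
        · rw [h]; exact h1.symm
      exact Or.inr ⟨hl, min_le_left c r⟩
  · rw [if_neg h1]
    by_cases h2 : c.length < r.length
    · rw [if_pos h2]
      exact ⟨Or.inl rfl, Or.inl h2, keyLe_refl c⟩
    · rw [if_neg h2]
      exact ⟨Or.inr rfl, keyLe_refl r, Or.inl (by omega)⟩

lemma min2_spec_aux :
    ∀ (t : List (List Char)) (m : List Char),
    ∃ m', PySem.List.min2? (m :: t) (fun s => s.length) (fun s => s) = some m' ∧
      (m' = m ∨ m' ∈ t) ∧ ∀ y ∈ m :: t, keyLe m' y := by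
  intro t
  induction t with
  | nil =>
    intro m
    refine ⟨m, by simp [PySem.List.min2?], Or.inl rfl, ?_⟩
    intro y hy
    rw [List.mem_singleton] at hy
    subst hy
    exact keyLe_refl _
  | cons y t ih =>
    intro m
    have hstep : PySem.List.min2? (m :: y :: t) (fun s => s.length) (fun s => s)
        = PySem.List.min2? ((if (decide (y.length < m.length)
              || (!decide (m.length < y.length) && decide (y < m))) = true
            then y else m) :: t) (fun s => s.length) (fun s => s) := by
      simp only [PySem.List.min2?, List.foldl_cons]
      congr 1
      split <;> rfl
    set m2 := (if (decide (y.length < m.length)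
        || (!decide (m.length < y.length) && decide (y < m))) = true then y else m) with hm2
    have hm2le : keyLe m2 m ∧ keyLe m2 y := by
      rw [hm2]
      split
      · next hcond =>
        simp only [Bool.or_eq_true, Bool.and_eq_true, Bool.not_eq_true', decide_eq_true_eq,
          decide_eq_false_iff_not] at hcond
        constructor
        · rcases hcond with h | ⟨h1, h2⟩
          · exact Or.inl h
          · rcases Nat.lt_or_ge y.length m.length with h' | h'
            · exact Or.inl h'
            · exact Or.inr ⟨by omega, le_of_lt h2⟩
        · exact keyLe_refl y
      · next hcond =>
        simp only [Bool.or_eq_true, Bool.and_eq_true, Bool.not_eq_true', decide_eq_true_eq,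
          decide_eq_false_iff_not] at hcond
        push Not at hcond
        refine ⟨keyLe_refl m, ?_⟩
        rw [keyLe_iff_not]
        rintro (h | ⟨h1, h2⟩)
        · omega
        · exact absurd h2 (not_lt.mpr (hcond.2 (by omega)))
    obtain ⟨m', heq, hmem, hmin⟩ := ih m2
    refine ⟨m', by rw [hstep]; exact heq, ?_, ?_⟩
    · rcases hmem with rfl | hmem
      · rw [hm2]; split
        · exact Or.inr (List.mem_cons_self)
        · exact Or.inl rfl
      · exact Or.inr (List.mem_cons_of_mem y hmem)
    · intro z hz
      have hm'm2 : keyLe m' m2 := hmin m2 (List.mem_cons_self)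
      rcases List.mem_cons.mp hz with rfl | hz'
      · exact keyLe_trans hm'm2 hm2le.1
      rcases List.mem_cons.mp hz' with rfl | hz''
      · exact keyLe_trans hm'm2 hm2le.2
      · exact hmin z (List.mem_cons_of_mem m2 hz'')

lemma min2_spec (xs : List (List Char)) (hne : xs ≠ []) :
    ∃ m, PySem.List.min2? xs (fun s => s.length) (fun s => s) = some m ∧
      m ∈ xs ∧ ∀ y ∈ xs, keyLe m y := by
  cases xs with
  | nil => exact absurd rfl hne
  | cons x t =>
    obtain ⟨m, heq, hmem, hmin⟩ := min2_spec_aux t x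
    refine ⟨m, heq, ?_, hmin⟩
    rcases hmem with rfl | hmem
    · exact List.mem_cons_self
    · exact List.mem_cons_of_mem x hmem

lemma visitA_fold (c0 : List Char) :
    ∀ (L cands : List (List Char)) (po : PySem.Set (List Char)) (r : List Char),
    po.Nodup → (r = c0 ∨ r ∈ po) → (∀ x, (x = c0 ∨ x ∈ po) → keyLe r x) →
    (∀ x ∈ po, x ∈ (L.foldl visitA (cands, po, r)).2.1) ∧
    (∀ x ∈ (L.foldl visitA (cands, po, r)).2.1, x ∈ po ∨ x ∈ L) ∧
    (∀ x ∈ (L.foldl visitA (cands, po, r)).2.1, x ∈ po ∨ x ∈ (L.foldl visitA (cands, po, r)).1) ∧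
    (∀ x ∈ cands, x ∈ (L.foldl visitA (cands, po, r)).1) ∧
    (∀ x ∈ (L.foldl visitA (cands, po, r)).1, x ∈ cands ∨ x ∈ (L.foldl visitA (cands, po, r)).2.1) ∧
    (∀ c ∈ L, c ∈ (L.foldl visitA (cands, po, r)).2.1) ∧
    (L.foldl visitA (cands, po, r)).2.1.Nodup ∧
    ((L.foldl visitA (cands, po, r)).1.length + po.length
      = cands.length + (L.foldl visitA (cands, po, r)).2.1.length) ∧
    ((L.foldl visitA (cands, po, r)).2.2 = c0 ∨
      (L.foldl visitA (cands, po, r)).2.2 ∈ (L.foldl visitA (cands, po, r)).2.1) ∧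
    (∀ x, (x = c0 ∨ x ∈ (L.foldl visitA (cands, po, r)).2.1) →
      keyLe (L.foldl visitA (cands, po, r)).2.2 x) := by
  intro L
  induction L with
  | nil =>
    intro cands po r hnd hrmem hrmin
    exact ⟨fun x hx => hx, fun x hx => Or.inl hx, fun x hx => Or.inl hx, fun x hx => hx,
      fun x hx => Or.inl hx, fun c hc => absurd hc List.not_mem_nil, hnd, rfl,
      hrmem, hrmin⟩
  | cons c L ih =>
    intro cands po r hnd hrmem hrmin
    rw [List.foldl_cons]
    by_cases hc : c ∈ po
    · rw [show visitA (cands, po, r) c = (cands, po, r) from by simp [visitA, hc]]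
      obtain ⟨i1, i2, i3, i4, i5, i6, i7, i8, i9, i10⟩ := ih cands po r hnd hrmem hrmin
      exact ⟨i1, fun x hx => (i2 x hx).imp id (List.mem_cons_of_mem c), i3, i4, i5,
        fun c' hc' => by
          rcases List.mem_cons.mp hc' with rfl | h
          · exact i1 c' hc
          · exact i6 c' h,
        i7, i8, i9, i10⟩
    · have hv : visitA (cands, po, r) c
          = (c :: cands, po.add c,
             if c.length = r.length then min c r else if c.length < r.length then c else r) := by
        simp [visitA, hc]
      rw [hv]
      obtain ⟨hu1, hu2, hu3⟩ := keyLe_update c r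
      set r' := if c.length = r.length then min c r else if c.length < r.length then c else r
        with hr'
      have hnd' : (po.add c).Nodup := PySem.Set.nodup_add po c hnd
      have hrmem' : r' = c0 ∨ r' ∈ po.add c := by
        rcases hu1 with h | h
        · right; rw [h]; exact (PySem.Set.mem_add po c c).mpr (Or.inr rfl)
        · rcases hrmem with h2 | h2
          · left; rw [h, h2]
          · right; rw [h]; exact (PySem.Set.mem_add po c r).mpr (Or.inl h2)
      have hrmin' : ∀ x, (x = c0 ∨ x ∈ po.add c) → keyLe r' x := by
        intro x hx
        rcases hx with rfl | hx
        · exact keyLe_trans hu2 (hrmin x (Or.inl rfl))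
        · rcases (PySem.Set.mem_add po c x).mp hx with hx' | rfl
          · exact keyLe_trans hu2 (hrmin x (Or.inr hx'))
          · exact hu3
      obtain ⟨i1, i2, i3, i4, i5, i6, i7, i8, i9, i10⟩ :=
        ih (c :: cands) (po.add c) r' hnd' hrmem' hrmin'
      have hmempo : ∀ x ∈ po, x ∈ po.add c :=
        fun x hx => (PySem.Set.mem_add po c x).mpr (Or.inl hx)
      have hcadd : c ∈ po.add c := (PySem.Set.mem_add po c c).mpr (Or.inr rfl)
      refine ⟨fun x hx => i1 x (hmempo x hx), ?_, ?_, ?_, ?_, ?_, i7, ?_, i9, i10⟩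
      · intro x hx
        rcases i2 x hx with h | h
        · rcases (PySem.Set.mem_add po c x).mp h with h' | rfl
          · exact Or.inl h'
          · exact Or.inr List.mem_cons_self
        · exact Or.inr (List.mem_cons_of_mem c h)
      · intro x hx
        rcases i3 x hx with h | h
        · rcases (PySem.Set.mem_add po c x).mp h with h' | rfl
          · exact Or.inl h'
          · exact Or.inr (i4 x List.mem_cons_self)
        · exact Or.inr h
      · exact fun x hx => i4 x (List.mem_cons_of_mem c hx)
      · intro x hx
        rcases i5 x hx with h | h
        · rcases List.mem_cons.mp h with rfl | h'
          · exact Or.inr (i1 x hcadd)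
          · exact Or.inl h'
        · exact Or.inr h
      · intro c' hc'
        rcases List.mem_cons.mp hc' with rfl | h
        · exact i1 c' hcadd
        · exact i6 c' h
      · have hlen : (po.add c).length = po.length + 1 := by
          rw [PySem.Set.add_of_not_mem hc]
          simp
        simp only [List.length_cons] at i8 ⊢
        omega

lemma loopA_spec (w c0 : List Char) :
    ∀ (fuel : Nat) (cands : List (List Char)) (po : PySem.Set (List Char)) (r : List Char),
    (∀ x ∈ cands, ReachDel w c0 x) →
    (∀ x ∈ po, ReachDel w c0 x) →
    (∀ v, (v = c0 ∨ v ∈ po) → v ∈ cands ∨ ∀ c, StepDel w v c → c ∈ po) →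
    (r = c0 ∨ r ∈ po) →
    (∀ x, (x = c0 ∨ x ∈ po) → keyLe r x) →
    po.Nodup →
    cands.length + 2 ^ c0.length < fuel + po.length →
    ReachDel w c0 (loopA w (w.length : Int) fuel cands po r) ∧
      ∀ x, ReachDel w c0 x → keyLe (loopA w (w.length : Int) fuel cands po r) x := by
  intro fuel
  induction fuel with
  | zero =>
    intro cands po r hcands hpo hcl hrmem hrmin hnd hmeas
    exfalso
    have hcap : po.length ≤ 2 ^ c0.length :=
      length_le_cap c0 po hnd (fun x hx => reach_sublist (hpo x hx))
    omega
  | succ fuel ih =>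
    intro cands po r hcands hpo hcl hrmem hrmin hnd hmeas
    cases cands with
    | nil =>
      have hr : loopA w (w.length : Int) (fuel + 1) [] po r = r := by
        simp [loopA]
      rw [hr]
      have hclosed : ∀ v, (v = c0 ∨ v ∈ po) → ∀ c, StepDel w v c → c ∈ po := by
        intro v hv
        rcases hcl v hv with h | h
        · exact absurd h List.not_mem_nil
        · exact h
      have hall : ∀ x, ReachDel w c0 x → (x = c0 ∨ x ∈ po) := by
        intro x hx
        induction hx with
        | refl => exact Or.inl rfl
        | tail h1 hstep ih2 => exact Or.inr (hclosed _ ih2 _ hstep)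
      constructor
      · rcases hrmem with h | h
        · rw [h]
          exact Relation.ReflTransGen.refl
        · exact hpo _ h
      · exact fun x hx => hrmin x (hall x hx)
    | cons v rest =>
      have hunf : loopA w (w.length : Int) (fuel + 1) (v :: rest) po r
          = loopA w (w.length : Int) fuel
              ((findCandidatesA v w (w.length : Int) (v.length + 1) 0).foldl visitA (rest, po, r)).1
              ((findCandidatesA v w (w.length : Int) (v.length + 1) 0).foldl visitA (rest, po, r)).2.1
              ((findCandidatesA v w (w.length : Int) (v.length + 1) 0).foldl visitA (rest, po, r)).2.2 := by
        simp only [loopA]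
      rw [hunf]
      obtain ⟨f1, f2, f3, f4, f5, f6, f7, f8, f9, f10⟩ :=
        visitA_fold c0 (findCandidatesA v w (w.length : Int) (v.length + 1) 0) rest po r
          hnd hrmem hrmin
      have hv : ReachDel w c0 v := hcands v List.mem_cons_self
      have hL : ∀ c ∈ findCandidatesA v w (w.length : Int) (v.length + 1) 0, StepDel w v c :=
        fun c hc => (childA_mem v w c).mp hc
      have hpo' : ∀ x ∈ ((findCandidatesA v w (w.length : Int) (v.length + 1) 0).foldl
          visitA (rest, po, r)).2.1, ReachDel w c0 x := by
        intro x hx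
        rcases f2 x hx with h | h
        · exact hpo x h
        · exact Relation.ReflTransGen.tail hv (hL x h)
      apply ih
      · intro x hx
        rcases f5 x hx with h | h
        · exact hcands x (List.mem_cons_of_mem v h)
        · exact hpo' x h
      · exact hpo'
      · intro v' hv'
        have hor : (v' = c0 ∨ v' ∈ po)
            ∨ v' ∈ ((findCandidatesA v w (w.length : Int) (v.length + 1) 0).foldl
                visitA (rest, po, r)).1 := by
          rcases hv' with rfl | hv''
          · exact Or.inl (Or.inl rfl)
          · rcases f3 v' hv'' with h | h
            · exact Or.inl (Or.inr h)
            · exact Or.inr h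
        rcases hor with hold | hnew
        · rcases hcl v' hold with hmemc | hexp
          · rcases List.mem_cons.mp hmemc with rfl | hrest
            · right
              intro c hc
              exact f6 c ((childA_mem v' w c).mpr hc)
            · exact Or.inl (f4 v' hrest)
          · right
            intro c hc
            exact f1 c (hexp c hc)
        · exact Or.inl hnew
      · exact f9
      · exact f10
      · exact f7
      · simp only [List.length_cons] at hmeas
        omega

lemma addB_fold :
    ∀ (L nxt : List (List Char)) (seen : PySem.Set (List Char)),
    seen.Nodup →
    (∀ x ∈ seen, x ∈ (L.foldl addB (nxt, seen)).2) ∧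
    (∀ x ∈ (L.foldl addB (nxt, seen)).2, x ∈ seen ∨ x ∈ L) ∧
    (∀ x ∈ (L.foldl addB (nxt, seen)).2, x ∈ seen ∨ x ∈ (L.foldl addB (nxt, seen)).1) ∧
    (∀ x ∈ nxt, x ∈ (L.foldl addB (nxt, seen)).1) ∧
    (∀ x ∈ (L.foldl addB (nxt, seen)).1, x ∈ nxt ∨ x ∈ (L.foldl addB (nxt, seen)).2) ∧
    (∀ c ∈ L, c ∈ (L.foldl addB (nxt, seen)).2) ∧
    (L.foldl addB (nxt, seen)).2.Nodup ∧
    ((L.foldl addB (nxt, seen)).2.length + nxt.length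
      = seen.length + (L.foldl addB (nxt, seen)).1.length) := by
  intro L
  induction L with
  | nil =>
    intro nxt seen hnd
    exact ⟨fun x hx => hx, fun x hx => Or.inl hx, fun x hx => Or.inl hx, fun x hx => hx,
      fun x hx => Or.inl hx, fun c hc => absurd hc List.not_mem_nil, hnd, rfl⟩
  | cons c L ih =>
    intro nxt seen hnd
    rw [List.foldl_cons]
    by_cases hc : c ∈ seen
    · rw [show addB (nxt, seen) c = (nxt, seen) from by simp [addB, hc]]
      obtain ⟨i1, i2, i3, i4, i5, i6, i7, i8⟩ := ih nxt seen hnd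
      exact ⟨i1, fun x hx => (i2 x hx).imp id (List.mem_cons_of_mem c), i3, i4, i5,
        fun c' hc' => by
          rcases List.mem_cons.mp hc' with rfl | h
          · exact i1 c' hc
          · exact i6 c' h, i7, i8⟩
    · rw [show addB (nxt, seen) c = (nxt ++ [c], seen.add c) from by simp [addB, hc]]
      have hnd' := PySem.Set.nodup_add seen c hnd
      obtain ⟨i1, i2, i3, i4, i5, i6, i7, i8⟩ := ih (nxt ++ [c]) (seen.add c) hnd'
      have hmemadd : ∀ x ∈ seen, x ∈ seen.add c :=
        fun x hx => (PySem.Set.mem_add seen c x).mpr (Or.inl hx)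
      have hcadd : c ∈ seen.add c := (PySem.Set.mem_add seen c c).mpr (Or.inr rfl)
      have hcnxt : c ∈ nxt ++ [c] := by simp
      refine ⟨fun x hx => i1 x (hmemadd x hx), ?_, ?_,
        fun x hx => i4 x (List.mem_append.mpr (Or.inl hx)), ?_, ?_, i7, ?_⟩
      · intro x hx
        rcases i2 x hx with h | h
        · rcases (PySem.Set.mem_add seen c x).mp h with h' | rfl
          · exact Or.inl h'
          · exact Or.inr List.mem_cons_self
        · exact Or.inr (List.mem_cons_of_mem c h)
      · intro x hx
        rcases i3 x hx with h | h
        · rcases (PySem.Set.mem_add seen c x).mp h with h' | rfl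
          · exact Or.inl h'
          · exact Or.inr (i4 x hcnxt)
        · exact Or.inr h
      · intro x hx
        rcases i5 x hx with h | h
        · rcases List.mem_append.mp h with h' | h'
          · exact Or.inl h'
          · have hxc : x = c := by simpa using h'
            subst hxc
            exact Or.inr (i1 x hcadd)
        · exact Or.inr h
      · intro c' hc'
        rcases List.mem_cons.mp hc' with rfl | h
        · exact i1 c' hcadd
        · exact i6 c' h
      · have hlen : (seen.add c).length = seen.length + 1 := by
          rw [PySem.Set.add_of_not_mem hc]
          simp
        simp only [List.length_append, List.length_cons, List.length_nil] at i8 ⊢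
        omega

lemma frontB_fold (w : List Char) :
    ∀ (F nxt : List (List Char)) (seen : PySem.Set (List Char)),
    seen.Nodup →
    (∀ x ∈ seen, x ∈ (F.foldl (fun st v => (childrenB v w (w.length : Int)).foldl addB st) (nxt, seen)).2) ∧
    (∀ x ∈ (F.foldl (fun st v => (childrenB v w (w.length : Int)).foldl addB st) (nxt, seen)).2,
      x ∈ seen ∨ ∃ v ∈ F, StepDel w v x) ∧
    (∀ x ∈ (F.foldl (fun st v => (childrenB v w (w.length : Int)).foldl addB st) (nxt, seen)).2,
      x ∈ seen ∨ x ∈ (F.foldl (fun st v => (childrenB v w (w.length : Int)).foldl addB st) (nxt, seen)).1) ∧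
    (∀ x ∈ nxt, x ∈ (F.foldl (fun st v => (childrenB v w (w.length : Int)).foldl addB st) (nxt, seen)).1) ∧
    (∀ x ∈ (F.foldl (fun st v => (childrenB v w (w.length : Int)).foldl addB st) (nxt, seen)).1,
      x ∈ nxt ∨ x ∈ (F.foldl (fun st v => (childrenB v w (w.length : Int)).foldl addB st) (nxt, seen)).2) ∧
    (∀ v ∈ F, ∀ c, StepDel w v c →
      c ∈ (F.foldl (fun st v => (childrenB v w (w.length : Int)).foldl addB st) (nxt, seen)).2) ∧
    (F.foldl (fun st v => (childrenB v w (w.length : Int)).foldl addB st) (nxt, seen)).2.Nodup ∧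
    ((F.foldl (fun st v => (childrenB v w (w.length : Int)).foldl addB st) (nxt, seen)).2.length + nxt.length
      = seen.length + (F.foldl (fun st v => (childrenB v w (w.length : Int)).foldl addB st) (nxt, seen)).1.length) := by
  intro F
  induction F with
  | nil =>
    intro nxt seen hnd
    exact ⟨fun x hx => hx, fun x hx => Or.inl hx, fun x hx => Or.inl hx, fun x hx => hx,
      fun x hx => Or.inl hx, fun v hv => absurd hv List.not_mem_nil, hnd, rfl⟩
  | cons v F ih =>
    intro nxt seen hnd
    rw [List.foldl_cons]
    obtain ⟨a1, a2, a3, a4, a5, a6, a7, a8⟩ := addB_fold (childrenB v w (w.length : Int)) nxt seen hnd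
    obtain ⟨i1, i2, i3, i4, i5, i6, i7, i8⟩ :=
      ih ((childrenB v w (w.length : Int)).foldl addB (nxt, seen)).1
         ((childrenB v w (w.length : Int)).foldl addB (nxt, seen)).2 a7
    simp only [Prod.mk.eta] at i1 i2 i3 i4 i5 i6 i7 i8
    refine ⟨fun x hx => i1 x (a1 x hx), ?_, ?_, fun x hx => i4 x (a4 x hx), ?_, ?_, i7, ?_⟩
    · intro x hx
      rcases i2 x hx with h | ⟨v', hv', hs⟩
      · rcases a2 x h with h' | h'
        · exact Or.inl h'
        · exact Or.inr ⟨v, List.mem_cons_self, (childB_mem v w x).mp h'⟩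
      · exact Or.inr ⟨v', List.mem_cons_of_mem v hv', hs⟩
    · intro x hx
      rcases i3 x hx with h | h
      · rcases a3 x h with h' | h'
        · exact Or.inl h'
        · exact Or.inr (i4 x h')
      · exact Or.inr h
    · intro x hx
      rcases i5 x hx with h | h
      · rcases a5 x h with h' | h'
        · exact Or.inl h'
        · exact Or.inr (i1 x h')
      · exact Or.inr h
    · intro v' hv' c hc
      rcases List.mem_cons.mp hv' with rfl | h
      · exact i1 c (a6 c ((childB_mem v' w c).mpr hc))
      · exact i6 v' h c hc
    · omega

lemma loopB_spec (w c0 : List Char) :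
    ∀ (fuel : Nat) (frontier : List (List Char)) (seen : PySem.Set (List Char)),
    (∀ x ∈ seen, ReachDel w c0 x) →
    c0 ∈ seen →
    (∀ x ∈ frontier, x ∈ seen) →
    (∀ v ∈ seen, v ∈ frontier ∨ ∀ c, StepDel w v c → c ∈ seen) →
    seen.Nodup →
    2 ^ c0.length + (if frontier = [] then 0 else 1) < fuel + seen.length →
    ∀ x, x ∈ loopB w (w.length : Int) fuel frontier seen ↔ ReachDel w c0 x := by
  intro fuel
  induction fuel with
  | zero =>
    intro frontier seen hseen hc0 hfs hcl hnd hmeas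
    exfalso
    have hcap : seen.length ≤ 2 ^ c0.length :=
      length_le_cap c0 seen hnd (fun x hx => reach_sublist (hseen x hx))
    split at hmeas <;> omega
  | succ fuel ih =>
    intro frontier seen hseen hc0 hfs hcl hnd hmeas
    cases frontier with
    | nil =>
      have hr : loopB w (w.length : Int) (fuel + 1) [] seen = seen := by
        simp [loopB]
      rw [hr]
      have hclosed : ∀ v ∈ seen, ∀ c, StepDel w v c → c ∈ seen := by
        intro v hv
        rcases hcl v hv with h | h
        · exact absurd h List.not_mem_nil
        · exact h
      intro x
      constructor
      · exact hseen x
      · intro hx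
        induction hx with
        | refl => exact hc0
        | tail h1 hstep ih2 => exact hclosed _ ih2 _ hstep
    | cons v fr =>
      have hunf : loopB w (w.length : Int) (fuel + 1) (v :: fr) seen
          = loopB w (w.length : Int) fuel
              ((v :: fr).foldl (fun st v => (childrenB v w (w.length : Int)).foldl addB st) ([], seen)).1
              ((v :: fr).foldl (fun st v => (childrenB v w (w.length : Int)).foldl addB st) ([], seen)).2 := by
        simp only [loopB]
      rw [hunf]
      obtain ⟨g1, g2, g3, g4, g5, g6, g7, g8⟩ := frontB_fold w (v :: fr) [] seen hnd
      have hseen' : ∀ x ∈ ((v :: fr).foldl (fun st v => (childrenB v w (w.length : Int)).foldl addB st) ([], seen)).2,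
          ReachDel w c0 x := by
        intro x hx
        rcases g2 x hx with h | ⟨v', hv', hs⟩
        · exact hseen x h
        · exact Relation.ReflTransGen.tail (hseen v' (hfs v' hv')) hs
      apply ih
      · exact hseen'
      · exact g1 c0 hc0
      · intro x hx
        rcases g5 x hx with h | h
        · exact absurd h List.not_mem_nil
        · exact h
      · intro v' hv'
        rcases g3 v' hv' with h | h
        · rcases hcl v' h with h' | h'
          · right
            intro c hc
            exact g6 v' h' c hc
          · right
            intro c hc
            exact g1 c (h' c hc)
        · exact Or.inl h
      · exact g7
      · simp only [List.length_nil] at g8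
        rw [if_neg (by simp : ¬ (v :: fr) = [])] at hmeas
        by_cases he : ((v :: fr).foldl (fun st v => (childrenB v w (w.length : Int)).foldl addB st) ([], seen)).1 = []
        · rw [if_pos he]
          omega
        · rw [if_neg he]
          have hpos : 0 < ((v :: fr).foldl (fun st v => (childrenB v w (w.length : Int)).foldl addB st) ([], seen)).1.length :=
            List.length_pos_of_ne_nil he
          omega

lemma answer_eq_alt (chunk word : String) : answer chunk word = answer_alt chunk word := by

  simp only [answer, answer_alt]
  have hA := loopA_spec word.toList chunk.toList (2 ^ chunk.toList.length + 2) [chunk.toList]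
      PySem.Set.empty chunk.toList
    (by intro x hx
        have hx' := List.mem_singleton.mp hx
        subst hx'
        exact Relation.ReflTransGen.refl)
    (by intro x hx
        rw [PySem.Set.empty_eq] at hx
        exact absurd hx List.not_mem_nil)
    (by intro v hv
        rcases hv with rfl | hv'
        · exact Or.inl (List.mem_singleton.mpr rfl)
        · rw [PySem.Set.empty_eq] at hv'
          exact absurd hv' List.not_mem_nil)
    (Or.inl rfl)
    (by intro x hx
        rcases hx with rfl | hx'
        · exact keyLe_refl _
        · rw [PySem.Set.empty_eq] at hx'
          exact absurd hx' List.not_mem_nil)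
    (by rw [PySem.Set.empty_eq]; exact List.nodup_nil)
    (by rw [PySem.Set.empty_eq]
        simp only [List.length_singleton, List.length_nil]
        omega)
  have hB := loopB_spec word.toList chunk.toList (2 ^ chunk.toList.length + 2) [chunk.toList]
      (PySem.Set.ofList [chunk.toList])
    (by intro x hx
        have hx' := List.mem_singleton.mp ((PySem.Set.mem_ofList _ _).mp hx)
        subst hx'
        exact Relation.ReflTransGen.refl)
    ((PySem.Set.mem_ofList _ _).mpr (List.mem_singleton.mpr rfl))
    (by intro x hx
        exact (PySem.Set.mem_ofList _ _).mpr hx)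
    (by intro v hv
        exact Or.inl (List.mem_singleton.mpr (List.mem_singleton.mp ((PySem.Set.mem_ofList _ _).mp hv))))
    (PySem.Set.nodup_ofList _)
    (by rw [if_neg (by simp : ¬ ([chunk.toList] : List (List Char)) = [])]
        omega)
  obtain ⟨hAmem, hAmin⟩ := hA
  have hc0 : chunk.toList ∈ loopB word.toList (word.toList.length : Int)
      (2 ^ chunk.toList.length + 2) [chunk.toList] (PySem.Set.ofList [chunk.toList]) :=
    (hB chunk.toList).mpr Relation.ReflTransGen.refl
  have hne : loopB word.toList (word.toList.length : Int)
      (2 ^ chunk.toList.length + 2) [chunk.toList] (PySem.Set.ofList [chunk.toList]) ≠ [] := by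
    intro h
    rw [h] at hc0
    exact absurd hc0 List.not_mem_nil
  obtain ⟨m, hmeq, hmmem, hmmin⟩ := min2_spec _ hne
  rw [hmeq, Option.getD_some]
  have h1 : keyLe (loopA word.toList (word.toList.length : Int) (2 ^ chunk.toList.length + 2)
      [chunk.toList] PySem.Set.empty chunk.toList) m := hAmin m ((hB m).mp hmmem)
  have h2 : keyLe m (loopA word.toList (word.toList.length : Int) (2 ^ chunk.toList.length + 2)
      [chunk.toList] PySem.Set.empty chunk.toList) := hmmin _ ((hB _).mpr hAmem)
  rw [keyLe_antisymm h1 h2]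

-- ===== VERDICT (by name: the statement is the Claim_ definition above) =====
theorem answer_spec : Claim_equal_answer := by
  intro chunk word _
  show answer chunk word = answer_alt chunk word
  exact answer_eq_alt chunk word
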